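-- pv_equiv track=rewrite | github.com/PedroBayerMachado/Python_Codes | cifra.py | cifra
-- ===== SOURCE A (Python) =====
-- def cifra(texto):
--     vogais = "aeiou"
--     alfabeto = "abcdefghijklmnopqrstuvwxyz"
--
--     resultado = []
--
--     for ch in texto:
--         if ch not in alfabeto:
--             # Mantém espaços e pontuação
--             resultado.append(ch)
--         elif ch in vogais:
--             resultado.append(ch)
--         else:
--             # Parte 1: consoante original
--             resultado.append(ch)
--
--             # Parte 2: vogal mais próxima
--             pos = alfabeto.index(ch)
--             menor_d = float('inf')
--             escolha_v = None
--             for v in vogais: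
--                 d = abs(pos - alfabeto.index(v))
--                 if d < menor_d or (d == menor_d and v < escolha_v):
--                     menor_d = d
--                     escolha_v = v
--             resultado.append(escolha_v)
--
--             # Parte 3: próxima consoante
--             prox = ch  # padrão: repetir a própria se for 'z'
--             for nxt in alfabeto[pos+1:]:
--                 if nxt not in vogais:
--                     prox = nxt
--                     break
--             resultado.append(prox)
--
--     return "".join(resultado)
-- ===== SOURCE B (Python) =====
-- def cifra(texto):
--     vogais = "aeiou"
--     alfabeto = "abcdefghijklmnopqrstuvwxyz"
--
--     # Precompute the 3-char expansion for every consonant once.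
--     table = {}
--     for pos, ch in enumerate(alfabeto):
--         if ch in vogais:
--             continue
--         vogal = min(vogais, key=lambda v: (abs(pos - alfabeto.index(v)), v))
--         prox = ch  # 'z' falls back on itself
--         for nxt in alfabeto[pos + 1:]:
--             if nxt not in vogais:
--                 prox = nxt
--                 break
--         table[ch] = ch + vogal + prox
--
--     # Single pass: vowels and non-letters fall through unchanged.
--     return "".join(table.get(ch, ch) for ch in texto)
-- ===== Notes on version B (the rewrite author's own statement) =====
-- stated objective: alternative
-- what changed: B precomputes, in one pass over the alphabet, a consonant-to-3-char-expansion dict (nearest vowel with the same tie-break, next consonant with the 'z' self-default) and then emits the output in a single dict-lookup pass via table.get(ch, ch), removing A's per-character nested scans of the vowel and alphabet strings.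
import Mathlib
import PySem

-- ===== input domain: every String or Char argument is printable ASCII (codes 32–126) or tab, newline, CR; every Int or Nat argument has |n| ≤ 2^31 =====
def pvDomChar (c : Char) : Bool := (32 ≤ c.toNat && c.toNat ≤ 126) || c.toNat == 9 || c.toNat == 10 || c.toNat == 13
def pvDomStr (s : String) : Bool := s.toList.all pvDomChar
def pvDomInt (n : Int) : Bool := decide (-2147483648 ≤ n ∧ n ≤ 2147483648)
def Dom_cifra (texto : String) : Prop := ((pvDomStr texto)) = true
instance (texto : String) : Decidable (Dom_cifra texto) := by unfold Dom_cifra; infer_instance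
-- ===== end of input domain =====

-- B precomputes a consonant→3-chars table once and maps it over the text (objective: alternative — per-char rescans hoisted into a table).

-- ===== PORT A =====
def cifraVogais : List Char := ['a', 'e', 'i', 'o', 'u']
def cifraAlf : List Char := ['a','b','c','d','e','f','g','h','i','j','k','l','m',
                             'n','o','p','q','r','s','t','u','v','w','x','y','z']

-- 'for nxt in alfabeto[pos+1:]: if nxt not in vogais: prox = nxt; break' (prox starts at ch)
def cifraProxA : List Char → Char → Char
  | [], prox => prox
  | nxt :: rest, prox => if nxt ∉ cifraVogais then nxt else cifraProxA rest prox

-- the inner vowel loop: state (menor_d, escolha_v); they start float('inf')/None and are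
-- always updated together, so the pair is one Option (none = not yet set)
def cifraVowelLoop (pos : Int) : Option Char :=
  (cifraVogais.foldl
    (fun (st : Option (Int × Char)) v =>
      let d : Int := |pos - (((PySem.List.index? cifraAlf v).getD 0 : Nat) : Int)|
      match st with
      | none => some (d, v)  -- d < inf always
      | some (m, ec) =>
        if d < m ∨ (d = m ∧ v < ec) then some (d, v) else some (m, ec))
    none).map (·.2)

-- what one loop iteration of A appends to 'resultado' for the character ch
def cifraStep (ch : Char) : List Char :=
  if ch ∉ cifraAlf then [ch]
  else if ch ∈ cifraVogais then [ch]
  else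
    let pos : Nat := (PySem.List.index? cifraAlf ch).getD 0  -- ch ∈ alfabeto is guarded
    -- escolha_v is always some after the loop (vogais nonempty); .getD ch never fires
    [ch, (cifraVowelLoop (pos : Int)).getD ch, cifraProxA (cifraAlf.drop (pos + 1)) ch]

def cifra (texto : String) : String :=
  String.mk (texto.toList.foldl (fun res ch => res ++ cifraStep ch) [])

-- ===== PORT B =====
-- 'for nxt in alfabeto[pos+1:]: …'  (same loop shape as in Source B)
def cifraProxB : List Char → Char → Char
  | [], prox => prox
  | nxt :: rest, prox => if nxt ∉ cifraVogais then nxt else cifraProxB rest prox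

-- the precomputed consonant → 3-char expansion table of Source B
def cifraTable : PySem.Dict Char (List Char) :=
  (PySem.List.enumerate cifraAlf).foldl
    (fun t pc =>
      let pos := pc.1
      let ch := pc.2
      if ch ∈ cifraVogais then t
      else
        let vogal := (PySem.List.min2? cifraVogais
          (fun v => |pos - (((PySem.List.index? cifraAlf v).getD 0 : Nat) : Int)|)
          (fun v => v)).getD ch
        let prox := cifraProxB (cifraAlf.drop (pos.toNat + 1)) ch
        PySem.Dict.insert t ch [ch, vogal, prox])
    PySem.Dict.empty

def cifra_alt (texto : String) : String :=
  String.mk ((texto.toList.map (fun ch => (PySem.Dict.get? cifraTable ch).getD [ch])).flatten)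

-- ===== PRECONDITION & SPEC =====
def Spec_cifra (texto : String) (out : String) : Prop := out = cifra_alt texto
instance (texto : String) (out : String) : Decidable (Spec_cifra texto out) := by unfold Spec_cifra; infer_instance

-- ===== CLAIM (what is proved, stated in full; the proofs are below) =====
def Claim_equal_cifra : Prop := ∀ (texto : String), Dom_cifra texto → Spec_cifra texto (cifra texto)

-- ===== LEMMAS AND PROOFS =====

-- the table evaluates to this literal dict (finite computation, checked by the kernel)
set_option maxRecDepth 8192 in
theorem cifraTable_eval :
    cifraTable = PySem.Dict.mk [('b', ['b', 'a', 'c']), ('c', ['c', 'a', 'd']), ('d', ['d', 'e', 'f']), ('f', ['f', 'e', 'g']), ('g', ['g', 'e', 'h']), ('h', ['h', 'i', 'j']), ('j', ['j', 'i', 'k']), ('k', ['k', 'i', 'l']), ('l', ['l', 'i', 'm']), ('m', ['m', 'o', 'n']), ('n', ['n', 'o', 'p']), ('p', ['p', 'o', 'q']), ('q', ['q', 'o', 'r']), ('r', ['r', 'o', 's']), ('s', ['s', 'u', 't']), ('t', ['t', 'u', 'v']), ('v', ['v', 'u', 'w']), ('w', ['w', 'u', 'x']), ('x', ['x', 'u',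 'y']), ('y', ['y', 'u', 'z']), ('z', ['z', 'u', 'z'])] := by
  rfl

-- every key of the precomputed table is an alphabet letter
theorem cifraTable_keys_sub : ∀ k ∈ (cifraTable).keys, k ∈ cifraAlf := by
  rw [cifraTable_eval]
  intro k hk
  simp only [PySem.Dict.keys_mk, List.map_cons, List.map_nil, List.mem_cons,
             List.not_mem_nil, or_false] at hk
  rcases hk with rfl|rfl|rfl|rfl|rfl|rfl|rfl|rfl|rfl|rfl|rfl|rfl|rfl|rfl|rfl|rfl|rfl|rfl|rfl|rfl|rfl <;> decide

-- the per-character expansions agree for EVERY character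
set_option maxRecDepth 8192 in
theorem cifraStep_eq (ch : Char) :
    cifraStep ch = (PySem.Dict.get? cifraTable ch).getD [ch] := by
  by_cases h : ch ∈ cifraAlf
  · simp only [cifraAlf, List.mem_cons, List.not_mem_nil, or_false] at h
    rcases h with rfl|rfl|rfl|rfl|rfl|rfl|rfl|rfl|rfl|rfl|rfl|rfl|rfl|rfl|rfl|rfl|rfl|rfl|rfl|rfl|rfl|rfl|rfl|rfl|rfl|rfl <;>
      rw [cifraTable_eval] <;> decide
  · have hnone : PySem.Dict.get? cifraTable ch = none := by
      rw [PySem.Dict.get?_eq_none_iff_not_mem_keys]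
      exact fun hk => h (cifraTable_keys_sub ch hk)
    unfold cifraStep
    rw [if_pos h, hnone]
    rfl

theorem cifra_spec : Claim_equal_cifra := by
  intro texto _
  unfold Spec_cifra cifra cifra_alt
  rw [PySem.List.foldl_append_eq_flatMap, List.nil_append,
      show cifraStep = (fun ch => (PySem.Dict.get? cifraTable ch).getD [ch]) from funext cifraStep_eq,
      List.flatMap_def]
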